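-- pv_equiv track=rewrite | github.com/smiles724/Proteo-R1 | proteor1/cdr_eval/cdr_masking.py | reorder_sequences_by_chain_ids
-- ===== SOURCE A (Python) =====
-- def reorder_sequences_by_chain_ids(
--     json_data: dict,
--     ordered_chain_ids: list[str],
--     case_insensitive: bool = True,
-- ) -> dict:
--     """
--     Reorder sequences in JSON to match the specified chain ID order.
--
--     This function reorders the sequences list so that entities appear in the
--     same order as the provided chain IDs. Entities are matched by auth_asym_id.
--
--     Args:
--         json_data: Protenix JSON dictionary with sequences
--         ordered_chain_ids: List of chain IDs in the desired order
--             (e.g., ["D", "E", "G"] for heavy, light, antigen)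
--         case_insensitive: If True, perform case-insensitive chain ID matching (default: True)
--
--     Returns:
--         JSON dictionary with reordered sequences
--
--     Notes:
--         - Only reorders entities that match auth_asym_id in ordered_chain_ids
--         - Entities not in ordered_chain_ids are appended at the end
--         - Does NOT remap covalent bonds (assumes this is called after filtering)
--     """
--     import copy
--
--     sequences = json_data.get("sequences", [])
--     if not sequences:
--         return json_data
--
--     # Build a mapping from auth_asym_id (normalized) to sequence item
--     # For entities with multiple chains, use the first auth_asym_id
--     chain_to_seq: dict[str, dict] = {}
--     unmatched_sequences: list[dict] = []
--
--     for seq_item in sequences: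
--         entity_data = None
--         for etype in ["proteinChain", "dnaSequence", "rnaSequence", "ligand", "ion"]:
--             if etype in seq_item:
--                 entity_data = seq_item[etype]
--                 break
--
--         if entity_data is None:
--             unmatched_sequences.append(seq_item)
--             continue
--
--         auth_asym_ids = entity_data.get("auth_asym_id", [])
--         if not auth_asym_ids:
--             unmatched_sequences.append(seq_item)
--             continue
--
--         # Use the first auth_asym_id as the key (normalized for case-insensitive matching)
--         first_chain_id = auth_asym_ids[0]
--         key = first_chain_id.upper() if case_insensitive else first_chain_id
--         chain_to_seq[key] = seq_item
--
--     # Build reordered sequence list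
--     reordered_sequences: list[dict] = []
--     seen_chains: set[str] = set()
--
--     for chain_id in ordered_chain_ids:
--         key = chain_id.upper() if case_insensitive else chain_id
--         if key in chain_to_seq and key not in seen_chains:
--             reordered_sequences.append(chain_to_seq[key])
--             seen_chains.add(key)
--
--     # Append any remaining sequences not in ordered_chain_ids
--     for key, seq_item in chain_to_seq.items():
--         if key not in seen_chains:
--             reordered_sequences.append(seq_item)
--
--     reordered_sequences.extend(unmatched_sequences)
--
--     # Create result JSON
--     result_json = copy.deepcopy(json_data)
--     result_json["sequences"] = reordered_sequences
--
--     return result_json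
-- ===== SOURCE B (Python) =====
-- def reorder_sequences_by_chain_ids(
--     json_data: dict,
--     ordered_chain_ids: list[str],
--     case_insensitive: bool = True,
-- ) -> dict:
--     """Reorder sequences to match ordered_chain_ids via a rank map and one
--     stable decorate-sort pass instead of two explicit partition loops."""
--     import copy
--
--     sequences = json_data.get("sequences", [])
--     if not sequences:
--         return json_data
--
--     norm = (lambda s: s.upper()) if case_insensitive else (lambda s: s)
--
--     # key -> seq item (last wins, as dict overwrite), plus the unmatched items
--     chain_to_seq: dict[str, dict] = {}
--     unmatched_sequences: list[dict] = []
--     for seq_item in sequences: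
--         ids = []
--         for etype in ["proteinChain", "dnaSequence", "rnaSequence", "ligand", "ion"]:
--             if etype in seq_item:
--                 ids = seq_item[etype].get("auth_asym_id", [])
--                 break
--         if ids:
--             chain_to_seq[norm(ids[0])] = seq_item
--         else:
--             unmatched_sequences.append(seq_item)
--
--     # rank of each normalized chain id = its first occurrence index
--     n = len(ordered_chain_ids)
--     rank: dict[str, int] = {}
--     for i, cid in enumerate(ordered_chain_ids):
--         rank.setdefault(norm(cid), i)
--
--     # decorate-sort-undecorate: absent keys rank n, ties broken by dict position
--     decorated = sorted(
--         enumerate(chain_to_seq.items()),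
--         key=lambda t: (rank.get(t[1][0], n), t[0]),
--     )
--     reordered_sequences = [item for _, (_, item) in decorated]
--     reordered_sequences.extend(unmatched_sequences)
--
--     result_json = copy.deepcopy(json_data)
--     result_json["sequences"] = reordered_sequences
--     return result_json
-- ===== Notes on version B (the rewrite author's own statement) =====
-- stated objective: alternative
-- what changed: A's two explicit partition passes (ordered-ids loop with a seen-set, then a leftover scan of the dict) are replaced by building a first-occurrence rank map and producing the ordered-plus-leftover list with one decorate-sort-undecorate pass over chain_to_seq.items(), keyed by (rank or n, dict position).
import Mathlib
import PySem

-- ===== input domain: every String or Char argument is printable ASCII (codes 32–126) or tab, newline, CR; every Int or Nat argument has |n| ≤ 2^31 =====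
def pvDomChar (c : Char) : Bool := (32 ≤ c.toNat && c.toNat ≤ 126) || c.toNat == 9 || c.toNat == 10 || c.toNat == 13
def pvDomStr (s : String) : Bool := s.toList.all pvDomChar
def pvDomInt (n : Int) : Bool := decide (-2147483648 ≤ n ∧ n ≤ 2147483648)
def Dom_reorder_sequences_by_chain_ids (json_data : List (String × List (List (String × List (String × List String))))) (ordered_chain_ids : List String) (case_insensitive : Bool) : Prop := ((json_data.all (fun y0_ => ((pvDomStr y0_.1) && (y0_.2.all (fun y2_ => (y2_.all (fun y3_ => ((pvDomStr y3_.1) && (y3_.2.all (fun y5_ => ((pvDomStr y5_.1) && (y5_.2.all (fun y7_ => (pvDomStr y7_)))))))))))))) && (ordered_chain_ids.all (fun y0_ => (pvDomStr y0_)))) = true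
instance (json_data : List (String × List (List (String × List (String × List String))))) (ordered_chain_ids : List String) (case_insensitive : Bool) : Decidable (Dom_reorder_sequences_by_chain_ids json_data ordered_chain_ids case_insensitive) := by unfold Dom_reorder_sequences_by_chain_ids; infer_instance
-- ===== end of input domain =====

-- ===== PORT A =====
-- Shared type abbreviations for the nested JSON shape.
abbrev pvEntity := List (String × List String)          -- entity dict: field -> list of strings
abbrev pvSeqItem := List (String × pvEntity)            -- one sequences[] element: etype -> entity
def pvEtypes : List String := ["proteinChain", "dnaSequence", "rnaSequence", "ligand", "ion"]
-- 'chain_id.upper() if case_insensitive else chain_id' (used verbatim at both places A computes it)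
def pvNorm (case_insensitive : Bool) (s : String) : String :=
  if case_insensitive then PySem.Str.upper s else s

def reorder_sequences_by_chain_ids (json_data : List (String × List (List (String × List (String × List String))))) (ordered_chain_ids : List String) (case_insensitive : Bool) : List (String × List (List (String × List (String × List String)))) :=
  let sequences := (PySem.Dict.mk json_data).getD "sequences" []
  if sequences = [] then json_data
  else
    -- first loop: build chain_to_seq (dict, last wins) and unmatched_sequences
    let st := sequences.foldl (fun (st : PySem.Dict String pvSeqItem × List pvSeqItem) seq_item =>
      -- 'for etype in [...]: if etype in seq_item: entity_data = seq_item[etype]; break'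
      match (pvEtypes.find? (fun et => (PySem.Dict.mk seq_item).contains et)).bind
              (fun et => (PySem.Dict.mk seq_item).get? et) with
      | none => (st.1, st.2 ++ [seq_item])
      | some entity_data =>
        match (PySem.Dict.mk entity_data).getD "auth_asym_id" [] with
        | [] => (st.1, st.2 ++ [seq_item])
        | first_chain_id :: _ =>
          (st.1.insert (pvNorm case_insensitive first_chain_id) seq_item, st.2))
      (PySem.Dict.empty, [])
    let chain_to_seq := st.1
    let unmatched_sequences := st.2
    -- second loop: ordered ids with a seen-set
    -- (chain_to_seq[key] is ported as (get? key).getD []; exact because the guard checks containment)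
    let st2 := ordered_chain_ids.foldl (fun (st2 : List pvSeqItem × PySem.Set String) chain_id =>
      let key := pvNorm case_insensitive chain_id
      if chain_to_seq.contains key && !(PySem.Set.contains st2.2 key) then
        (st2.1 ++ [(chain_to_seq.get? key).getD []], PySem.Set.add st2.2 key)
      else st2) ([], PySem.Set.empty)
    -- third loop: leftovers of chain_to_seq not in seen
    let reordered := chain_to_seq.items.foldl
      (fun acc kv => if PySem.Set.contains st2.2 kv.1 then acc else acc ++ [kv.2]) st2.1
    ((PySem.Dict.mk json_data).insert "sequences" (reordered ++ unmatched_sequences)).items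

-- ===== PORT B =====
def reorder_sequences_by_chain_ids_alt (json_data : List (String × List (List (String × List (String × List String))))) (ordered_chain_ids : List String) (case_insensitive : Bool) : List (String × List (List (String × List (String × List String)))) :=
  let sequences := (PySem.Dict.mk json_data).getD "sequences" []
  if sequences = [] then json_data
  else
    let norm := pvNorm case_insensitive
    -- one classification pass: ids of the first matching etype (or []), then branch on it
    let st := sequences.foldl (fun (st : PySem.Dict String pvSeqItem × List pvSeqItem) seq_item =>
      let ids :=
        match pvEtypes.find? (fun et => (PySem.Dict.mk seq_item).contains et) with
        | some et => ((PySem.Dict.mk seq_item).get? et).elim []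
            (fun ent => (PySem.Dict.mk ent).getD "auth_asym_id" [])   -- seq_item[et] present by the find?
        | none => []
      match ids with
      | first :: _ => (st.1.insert (norm first) seq_item, st.2)
      | [] => (st.1, st.2 ++ [seq_item]))
      (PySem.Dict.empty, [])
    -- rank: first-occurrence index of each normalized ordered id
    let n : Int := ordered_chain_ids.length
    let rank := (PySem.List.enumerate ordered_chain_ids 0).foldl
      (fun d p => d.setdefault (norm p.2) p.1) PySem.Dict.empty
    -- decorate-sort-undecorate with Python's tuple key (rank or n, dict position);
    -- the lexicographic order on ℤ ×ₗ ℤ is exactly Python's tuple comparison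
    let decorated := PySem.List.sorted (PySem.List.enumerate st.1.items 0)
      (fun t => toLex ((rank.getD t.2.1 n, t.1) : Int × Int))
    let reordered := decorated.map (fun t => t.2.2) ++ st.2
    ((PySem.Dict.mk json_data).insert "sequences" reordered).items

-- ===== PRECONDITION & SPEC =====
-- (explicitly composed DecidableEq for the nested output type; instance search times out on it)
def pvD0 : DecidableEq String := instDecidableEqString
def pvD1 : DecidableEq (List String) := @instDecidableEqList _ pvD0
def pvD2 : DecidableEq (String × List String) := @instDecidableEqProd _ _ pvD0 pvD1
def pvD3 : DecidableEq (List (String × List String)) := @instDecidableEqList _ pvD2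
def pvD4 : DecidableEq (String × List (String × List String)) := @instDecidableEqProd _ _ pvD0 pvD3
def pvD5 : DecidableEq (List (String × List (String × List String))) := @instDecidableEqList _ pvD4
def pvD6 : DecidableEq (List (List (String × List (String × List String)))) := @instDecidableEqList _ pvD5
def pvD7 : DecidableEq (String × List (List (String × List (String × List String)))) := @instDecidableEqProd _ _ pvD0 pvD6
def pvD8 : DecidableEq (List (String × List (List (String × List (String × List String))))) := @instDecidableEqList _ pvD7

def Spec_reorder_sequences_by_chain_ids (json_data : List (String × List (List (String × List (String × List String))))) (ordered_chain_ids : List String) (case_insensitive : Bool) (out : List (String × List (List (String × List (String × List String))))) : Prop := out = reorder_sequences_by_chain_ids_alt json_data ordered_chain_ids case_insensitive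
instance (json_data : List (String × List (List (String × List (String × List String))))) (ordered_chain_ids : List String) (case_insensitive : Bool) (out : List (String × List (List (String × List (String × List String))))) : Decidable (Spec_reorder_sequences_by_chain_ids json_data ordered_chain_ids case_insensitive out) := by unfold Spec_reorder_sequences_by_chain_ids; exact pvD8 _ _

-- ===== CLAIM (what is proved, stated in full; the proofs are below) =====
def Claim_equal_reorder_sequences_by_chain_ids : Prop := ∀ (json_data : List (String × List (List (String × List (String × List String))))) (ordered_chain_ids : List String) (case_insensitive : Bool), Dom_reorder_sequences_by_chain_ids json_data ordered_chain_ids case_insensitive → Spec_reorder_sequences_by_chain_ids json_data ordered_chain_ids case_insensitive (reorder_sequences_by_chain_ids json_data ordered_chain_ids case_insensitive)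

-- ===== LEMMAS AND PROOFS =====

-- The two first-pass loop bodies agree on every seq item.
lemma pv_build_eq (norm : String → String) (l : List pvSeqItem)
    (st : PySem.Dict String pvSeqItem × List pvSeqItem) :
    l.foldl (fun st seq_item =>
      match (pvEtypes.find? (fun et => (PySem.Dict.mk seq_item).contains et)).bind
              (fun et => (PySem.Dict.mk seq_item).get? et) with
      | none => (st.1, st.2 ++ [seq_item])
      | some entity_data =>
        match (PySem.Dict.mk entity_data).getD "auth_asym_id" [] with
        | [] => (st.1, st.2 ++ [seq_item])
        | first_chain_id :: _ => (st.1.insert (norm first_chain_id) seq_item, st.2)) st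
    = l.foldl (fun st seq_item =>
      let ids :=
        match pvEtypes.find? (fun et => (PySem.Dict.mk seq_item).contains et) with
        | some et => ((PySem.Dict.mk seq_item).get? et).elim []
            (fun ent => (PySem.Dict.mk ent).getD "auth_asym_id" [])
        | none => []
      match ids with
      | first :: _ => (st.1.insert (norm first) seq_item, st.2)
      | [] => (st.1, st.2 ++ [seq_item])) st := by
  apply PySem.List.foldl_congr_mem
  intro acc s _
  cases h : pvEtypes.find? (fun et => (PySem.Dict.mk s).contains et) with
  | none => simp
  | some et =>
    have hc := List.find?_some h
    rw [PySem.Dict.contains_eq_isSome_get?] at hc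
    obtain ⟨ent, he⟩ := Option.isSome_iff_exists.mp hc
    cases hids : (PySem.Dict.mk ent).getD "auth_asym_id" [] with
    | nil => simp [he, hids]
    | cons c cs => simp [he, hids]

-- The dict built by the first pass keeps Nodup keys.
lemma pv_build_nodup (norm : String → String) (l : List pvSeqItem)
    (st : PySem.Dict String pvSeqItem × List pvSeqItem) (h : st.1.keys.Nodup) :
    (l.foldl (fun st seq_item =>
      match (pvEtypes.find? (fun et => (PySem.Dict.mk seq_item).contains et)).bind
              (fun et => (PySem.Dict.mk seq_item).get? et) with
      | none => (st.1, st.2 ++ [seq_item])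
      | some entity_data =>
        match (PySem.Dict.mk entity_data).getD "auth_asym_id" [] with
        | [] => (st.1, st.2 ++ [seq_item])
        | first_chain_id :: _ => (st.1.insert (norm first_chain_id) seq_item, st.2)) st).1.keys.Nodup := by
  induction l generalizing st with
  | nil => exact h
  | cons s t ih =>
    simp only [List.foldl_cons]
    apply ih
    cases hf : (pvEtypes.find? (fun et => (PySem.Dict.mk s).contains et)).bind
        (fun et => (PySem.Dict.mk s).get? et) with
    | none => simpa [hf] using h
    | some ent =>
      cases hids : (PySem.Dict.mk ent).getD "auth_asym_id" [] with
      | nil => simpa [hf, hids] using h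
      | cons c cs =>
        simp only [hids]
        exact PySem.Dict.nodup_keys_insert _ _ _ h

-- Lower bound of the indices produced by enumerate.
lemma pv_enum_lb {α : Type} (l : List α) (i : Int) (t : Int × α)
    (ht : t ∈ PySem.List.enumerate l i) : i ≤ t.1 := by
  induction l generalizing i with
  | nil => simp [PySem.List.enumerate_nil] at ht
  | cons x xs ih =>
    rw [PySem.List.enumerate_cons] at ht
    rcases List.mem_cons.mp ht with h | h
    · subst h; simp
    · have := ih (i + 1) h; omega

lemma pv_enum_pairwise {α : Type} (l : List α) (i : Int) :
    (PySem.List.enumerate l i).Pairwise (fun a b => a.1 < b.1) := by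
  induction l generalizing i with
  | nil => simp [PySem.List.enumerate_nil]
  | cons x xs ih =>
    rw [PySem.List.enumerate_cons]
    refine List.pairwise_cons.mpr ⟨?_, ih (i + 1)⟩
    intro b hb
    have := pv_enum_lb xs (i + 1) b hb
    simp only
    omega

lemma pv_mem_enum_snd {α : Type} (l : List α) (i : Int) (t : Int × α)
    (ht : t ∈ PySem.List.enumerate l i) : t.2 ∈ l := by
  induction l generalizing i with
  | nil => simp [PySem.List.enumerate_nil] at ht
  | cons x xs ih =>
    rw [PySem.List.enumerate_cons] at ht
    rcases List.mem_cons.mp ht with h | h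
    · subst h; simp
    · exact List.mem_cons_of_mem _ (ih (i + 1) h)

-- Invariants of the rank fold: values bounded, strictly increasing along items, keys Nodup.
lemma pv_rank_props (norm : String → String) (ordered : List String) (i : Int)
    (r0 : PySem.Dict String Int)
    (hb : ∀ p ∈ r0.items, p.2 < i) (hp : r0.items.Pairwise (fun p q => p.2 < q.2))
    (hk : r0.keys.Nodup) :
    (∀ p ∈ ((PySem.List.enumerate ordered i).foldl (fun d p => d.setdefault (norm p.2) p.1) r0).items,
        p.2 < i + ordered.length) ∧
    ((PySem.List.enumerate ordered i).foldl (fun d p => d.setdefault (norm p.2) p.1) r0).items.Pairwise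
        (fun p q => p.2 < q.2) ∧
    ((PySem.List.enumerate ordered i).foldl (fun d p => d.setdefault (norm p.2) p.1) r0).keys.Nodup := by
  induction ordered generalizing i r0 with
  | nil =>
    refine ⟨?_, by simpa [PySem.List.enumerate_nil] using hp, by simpa [PySem.List.enumerate_nil] using hk⟩
    intro p hpmem
    simp only [PySem.List.enumerate_nil, List.foldl_nil] at hpmem
    have := hb p hpmem
    simp only [List.length_nil]
    omega
  | cons a t ih =>
    rw [PySem.List.enumerate_cons]
    simp only [List.foldl_cons]
    by_cases hc : r0.contains (norm a) = true
    · have hsd : r0.setdefault (norm a) i = r0 := by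
        unfold PySem.Dict.setdefault; simp [hc]
      rw [hsd]
      obtain ⟨B1, B2, B3⟩ := ih (i + 1) r0 (fun p hp' => by have := hb p hp'; omega) hp hk
      refine ⟨?_, B2, B3⟩
      intro p hpmem
      have := B1 p hpmem
      simp only [List.length_cons]
      push_cast at this ⊢
      omega
    · have hcf : r0.contains (norm a) = false := by simpa using hc
      have hsd : r0.setdefault (norm a) i = PySem.Dict.mk (r0.items ++ [(norm a, i)]) := by
        unfold PySem.Dict.setdefault; simp [hcf]
      rw [hsd]
      have hknew : (PySem.Dict.mk (r0.items ++ [(norm a, i)])).keys = r0.keys ++ [norm a] := by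
        simp [PySem.Dict.keys]
      have hnotmem : norm a ∉ r0.keys := fun hm =>
        by simp [(PySem.Dict.contains_iff_mem_keys r0 (norm a)).mpr hm] at hcf
      obtain ⟨B1, B2, B3⟩ := ih (i + 1) (PySem.Dict.mk (r0.items ++ [(norm a, i)]))
        (by
          intro p hpmem
          simp only [List.mem_append, List.mem_singleton] at hpmem
          rcases hpmem with h | h
          · have := hb p h; omega
          · subst h; omega)
        (by
          rw [List.pairwise_append]
          exact ⟨hp, List.pairwise_singleton _ _, fun p hp' q hq => by
            simp only [List.mem_singleton] at hq; subst hq; exact hb p hp'⟩)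
        (by
          rw [hknew, List.nodup_append]
          refine ⟨hk, List.nodup_singleton _, ?_⟩
          intro x hx y hy he
          exact hnotmem ((List.mem_singleton.mp hy) ▸ (he ▸ hx)))
      refine ⟨?_, B2, B3⟩
      intro p hpmem
      have := B1 p hpmem
      simp only [List.length_cons]
      push_cast at this ⊢
      omega

-- The ordered loop of A, characterized by the rank dict of B.
lemma pv_loop2_char (norm : String → String) (d : PySem.Dict String pvSeqItem)
    (ordered : List String) (i : Int) (r0 : PySem.Dict String Int)
    (acc : List pvSeqItem) (seen : PySem.Set String)
    (hseen : seen = r0.keys.filter (fun k => d.contains k))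
    (hacc : acc = r0.keys.filterMap (fun k => d.get? k)) :
    ordered.foldl (fun (st2 : List pvSeqItem × PySem.Set String) chain_id =>
      if d.contains (norm chain_id) && !(PySem.Set.contains st2.2 (norm chain_id)) then
        (st2.1 ++ [(d.get? (norm chain_id)).getD []], PySem.Set.add st2.2 (norm chain_id))
      else st2) (acc, seen)
    = (((PySem.List.enumerate ordered i).foldl (fun dd p => dd.setdefault (norm p.2) p.1) r0).keys.filterMap
          (fun k => d.get? k),
       ((PySem.List.enumerate ordered i).foldl (fun dd p => dd.setdefault (norm p.2) p.1) r0).keys.filter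
          (fun k => d.contains k)) := by
  induction ordered generalizing i r0 acc seen with
  | nil =>
    simp only [PySem.List.enumerate_nil, List.foldl_nil, hseen, hacc]
  | cons a t ih =>
    rw [PySem.List.enumerate_cons]
    simp only [List.foldl_cons]
    by_cases hrc : r0.contains (norm a) = true
    · have hsd : r0.setdefault (norm a) (i : Int) = r0 := by
        unfold PySem.Dict.setdefault; simp [hrc]
      rw [hsd]
      by_cases hdc : d.contains (norm a) = true
      · -- in dict and already ranked: it is in seen, so A skips
        have hmem : norm a ∈ seen := by
          rw [hseen, List.mem_filter]
          exact ⟨(PySem.Dict.contains_iff_mem_keys r0 (norm a)).mp hrc, hdc⟩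
        have hcontains : PySem.Set.contains seen (norm a) = true :=
          (PySem.Set.contains_iff seen (norm a)).mpr hmem
        simp only [hdc, hcontains, Bool.not_true, Bool.and_false]
        exact ih (i + 1) r0 acc seen hseen hacc
      · have hdf : d.contains (norm a) = false := by simpa using hdc
        simp only [hdf, Bool.false_and]
        exact ih (i + 1) r0 acc seen hseen hacc
    · have hrf : r0.contains (norm a) = false := by simpa using hrc
      have hsd : r0.setdefault (norm a) (i : Int) = PySem.Dict.mk (r0.items ++ [(norm a, i)]) := by
        unfold PySem.Dict.setdefault; simp [hrf]
      rw [hsd]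
      have hknew : (PySem.Dict.mk (r0.items ++ [(norm a, i)])).keys = r0.keys ++ [norm a] := by
        simp [PySem.Dict.keys]
      have hnotkeys : norm a ∉ r0.keys := fun hm =>
        by simp [(PySem.Dict.contains_iff_mem_keys r0 (norm a)).mpr hm] at hrf
      have hnotseen : norm a ∉ seen := by
        rw [hseen, List.mem_filter]; rintro ⟨hm, -⟩; exact hnotkeys hm
      have hcontains : PySem.Set.contains seen (norm a) = false := by
        by_contra hx
        have : PySem.Set.contains seen (norm a) = true := by
          cases h' : PySem.Set.contains seen (norm a) with
          | false => exact absurd h' hx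
          | true => rfl
        exact hnotseen ((PySem.Set.contains_iff seen (norm a)).mp this)
      by_cases hdc : d.contains (norm a) = true
      · have hvs : (d.get? (norm a)).isSome := by
          rw [← PySem.Dict.contains_eq_isSome_get?]; exact hdc
        obtain ⟨v, hv⟩ := Option.isSome_iff_exists.mp hvs
        simp only [hdc, hcontains, Bool.not_false, Bool.and_true, if_true]
        have hadd : PySem.Set.add seen (norm a) = seen ++ [norm a] :=
          PySem.Set.add_of_not_mem hnotseen
        rw [hadd]
        apply ih (i + 1)
        · rw [hknew, hseen, List.filter_append]
          simp [hdc]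
        · rw [hknew, hacc, List.filterMap_append]
          simp [hv]
      · have hdf : d.contains (norm a) = false := by simpa using hdc
        simp only [hdf, Bool.false_and]
        apply ih (i + 1)
        · rw [hknew, hseen, List.filter_append]
          simp [hdf]
        · rw [hknew, hacc, List.filterMap_append]
          have : d.get? (norm a) = none := by
            rw [PySem.Dict.get?_eq_none_iff_contains]; exact hdf
          simp [this]

-- find? over the enumerated items computes get? (first match).
lemma pv_find_enum (l : List (String × pvSeqItem)) (i : Int) (k : String) :
    ((PySem.List.enumerate l i).find? (fun t => t.2.1 == k)).map (fun t => t.2.2)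
      = (PySem.Dict.mk l).get? k := by
  induction l generalizing i with
  | nil => simp [PySem.List.enumerate_nil, PySem.Dict.get?]
  | cons kv rest ih =>
    obtain ⟨k0, v0⟩ := kv
    rw [PySem.List.enumerate_cons, PySem.Dict.get?_mk_cons]
    cases h : (k0 == k) with
    | true => simp [h]
    | false => simpa [h] using ih (i + 1)

-- With Nodup keys, the first match for a member's key is the member itself.
lemma pv_find_enum_self (l : List (String × pvSeqItem)) (hk : (l.map Prod.fst).Nodup)
    (i : Int) (t : Int × (String × pvSeqItem)) (ht : t ∈ PySem.List.enumerate l i) :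
    (PySem.List.enumerate l i).find? (fun u => u.2.1 == t.2.1) = some t := by
  induction l generalizing i with
  | nil => simp [PySem.List.enumerate_nil] at ht
  | cons kv rest ih =>
    rw [PySem.List.enumerate_cons] at ht ⊢
    rcases List.mem_cons.mp ht with h | h
    · subst h
      simp
    · have hsnd : t.2 ∈ rest := pv_mem_enum_snd rest (i + 1) t h
      have hkey : t.2.1 ∈ rest.map Prod.fst := List.mem_map_of_mem hsnd
      simp only [List.map_cons, List.nodup_cons] at hk
      have hne : kv.1 ≠ t.2.1 := fun he => hk.1 (he ▸ hkey)
      rw [List.find?_cons]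
      simp only [show ((i, kv).2.1 == t.2.1) = false from beq_eq_false_iff_ne.mpr hne]
      exact ih hk.2 (i + 1) h

-- filterMap whose hits are the mapped values is a sublist of the map.
lemma pv_filterMap_sublist {α β : Type} (l : List α) (g : α → Option β) (f : α → β)
    (h : ∀ a ∈ l, ∀ b, g a = some b → b = f a) :
    (l.filterMap g).Sublist (l.map f) := by
  induction l with
  | nil => simp
  | cons a t ih =>
    rw [List.filterMap_cons, List.map_cons]
    cases hga : g a with
    | none => exact (ih (fun x hx => h x (List.mem_cons_of_mem _ hx))).cons _
    | some b =>
      rw [h a List.mem_cons_self b hga]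
      exact (ih (fun x hx => h x (List.mem_cons_of_mem _ hx))).cons₂ _

-- Projecting the enumerated positions away commutes with filtering on the payload.
lemma pv_enum_filter_map {α : Type} (l : List α) (i : Int) (q : α → Bool) :
    (((PySem.List.enumerate l i).filter (fun t => q t.2)).map (fun t => t.2)) = l.filter q := by
  induction l generalizing i with
  | nil => simp [PySem.List.enumerate_nil]
  | cons x xs ih =>
    rw [PySem.List.enumerate_cons, List.filter_cons]
    cases h : q x with
    | true => simpa [List.filter_cons, h] using ih (i + 1)
    | false => simpa [List.filter_cons, h] using ih (i + 1)

-- B's stable sort, characterized: ranked items first (in rank order), then the rest in dict order.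
lemma pv_sorted_char (d : PySem.Dict String pvSeqItem) (hnd : d.keys.Nodup)
    (r : PySem.Dict String Int) (hr : r.keys.Nodup)
    (hrp : r.items.Pairwise (fun p q => p.2 < q.2)) (n : Int)
    (hbnd : ∀ p ∈ r.items, p.2 < n) :
    PySem.List.sorted (PySem.List.enumerate d.items 0)
        (fun t => toLex ((r.getD t.2.1 n, t.1) : Int × Int))
      = r.items.filterMap (fun p => (PySem.List.enumerate d.items 0).find? (fun t => t.2.1 == p.1))
        ++ (PySem.List.enumerate d.items 0).filter (fun t => !(r.contains t.2.1)) := by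
  have hndkeys : (d.items.map Prod.fst).Nodup := by
    simpa [PySem.Dict.keys] using hnd
  have hnodup_e : (PySem.List.enumerate d.items 0).Nodup :=
    (pv_enum_pairwise d.items 0).imp (fun h => by intro he; subst he; omega)
  -- every hit of the filterMap carries the key it was looked up with
  have hhit : ∀ p ∈ r.items, ∀ u,
      (PySem.List.enumerate d.items 0).find? (fun t => t.2.1 == p.1) = some u → u.2.1 = p.1 := by
    intro p _ u hu
    have := List.find?_some hu
    exact eq_of_beq this
  apply PySem.List.sorted_eq_of_perm_of_pairwise_lt
  · -- permutation
    have hD1nodup : (r.items.filterMap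
        (fun p => (PySem.List.enumerate d.items 0).find? (fun t => t.2.1 == p.1))).Nodup := by
      apply List.Nodup.of_map (f := fun t => t.2.1)
      rw [List.map_filterMap]
      apply List.Sublist.nodup (l₂ := r.items.map Prod.fst)
      · apply pv_filterMap_sublist
        intro p hp b hb
        rw [Option.map_eq_some_iff] at hb
        obtain ⟨u, hu, hub⟩ := hb
        rw [← hub]
        exact hhit p hp u hu
      · simpa [PySem.Dict.keys] using hr
    have hD2nodup : ((PySem.List.enumerate d.items 0).filter
        (fun t => !(r.contains t.2.1))).Nodup := hnodup_e.filter _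
    have hdisj : ∀ a ∈ r.items.filterMap
        (fun p => (PySem.List.enumerate d.items 0).find? (fun t => t.2.1 == p.1)),
        a ∉ (PySem.List.enumerate d.items 0).filter (fun t => !(r.contains t.2.1)) := by
      intro a ha hmem
      obtain ⟨p, hp, hfind⟩ := List.mem_filterMap.mp ha
      have hak : a.2.1 = p.1 := hhit p hp a hfind
      have hkmem : p.1 ∈ r.keys := by
        have : p.1 ∈ r.items.map Prod.fst := List.mem_map_of_mem hp
        simpa [PySem.Dict.keys] using this
      have hcont : r.contains a.2.1 = true := by
        rw [hak]; exact (PySem.Dict.contains_iff_mem_keys r p.1).mpr hkmem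
      have := List.of_mem_filter hmem
      simp [hcont] at this
    rw [List.perm_ext_iff_of_nodup (List.Nodup.append hD1nodup hD2nodup
      (by intro a ha hb; exact hdisj a ha hb)) hnodup_e]
    intro a
    constructor
    · intro ha
      rcases List.mem_append.mp ha with h | h
      · obtain ⟨p, _, hfind⟩ := List.mem_filterMap.mp h
        exact List.mem_of_find?_eq_some hfind
      · exact List.mem_of_mem_filter h
    · intro ha
      by_cases hc : r.contains a.2.1 = true
      · apply List.mem_append.mpr; left
        have hkmem : a.2.1 ∈ r.keys := (PySem.Dict.contains_iff_mem_keys r a.2.1).mp hc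
        have : a.2.1 ∈ r.items.map Prod.fst := by simpa [PySem.Dict.keys] using hkmem
        obtain ⟨p, hp, hpk⟩ := List.mem_map.mp this
        apply List.mem_filterMap.mpr
        refine ⟨p, hp, ?_⟩
        rw [hpk]
        exact pv_find_enum_self d.items hndkeys 0 a ha
      · apply List.mem_append.mpr; right
        apply List.mem_filter.mpr
        exact ⟨ha, by simp [hc]⟩
  · -- pairwise strictly increasing keys
    rw [List.pairwise_append]
    refine ⟨?_, ?_, ?_⟩
    · rw [List.pairwise_filterMap]
      apply List.Pairwise.imp_of_mem (R := fun p q => p.2 < q.2) ?_ hrp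
      intro p q hp hq hlt b hb b' hb'
      have hbk : b.2.1 = p.1 := hhit p hp b hb
      have hbk' : b'.2.1 = q.1 := hhit q hq b' hb'
      have hgb : r.getD b.2.1 n = p.2 := by
        rw [hbk]
        exact PySem.Dict.getD_of_mem_items r (by simpa using hp) hr n
      have hgb' : r.getD b'.2.1 n = q.2 := by
        rw [hbk']
        exact PySem.Dict.getD_of_mem_items r (by simpa using hq) hr n
      rw [Prod.Lex.lt_iff]
      left
      simpa [hgb, hgb'] using hlt
    · have hpw : ((PySem.List.enumerate d.items 0).filter
          (fun t => !(r.contains t.2.1))).Pairwise (fun a b => a.1 < b.1) :=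
        (pv_enum_pairwise d.items 0).sublist List.filter_sublist
      apply List.Pairwise.imp_of_mem (R := fun a b => a.1 < b.1) ?_ hpw
      intro a b ha hb hlt
      have hca : r.contains a.2.1 = false := by
        have := List.of_mem_filter ha; simpa using this
      have hcb : r.contains b.2.1 = false := by
        have := List.of_mem_filter hb; simpa using this
      rw [Prod.Lex.lt_iff]
      right
      constructor
      · simp [PySem.Dict.getD_of_not_contains r n hca, PySem.Dict.getD_of_not_contains r n hcb]
      · simpa using hlt
    · intro a ha b hb
      obtain ⟨p, hp, hfind⟩ := List.mem_filterMap.mp ha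
      have hak : a.2.1 = p.1 := hhit p hp a hfind
      have hga : r.getD a.2.1 n = p.2 := by
        rw [hak]
        exact PySem.Dict.getD_of_mem_items r (by simpa using hp) hr n
      have hcb : r.contains b.2.1 = false := by
        have := List.of_mem_filter hb; simpa using this
      rw [Prod.Lex.lt_iff]
      left
      have := hbnd p hp
      simp [hga, PySem.Dict.getD_of_not_contains r n hcb]
      omega

-- Master: A's loop2+loop3 output equals B's decorate-sort-undecorate output.
lemma pv_master (norm : String → String) (d : PySem.Dict String pvSeqItem)
    (hnd : d.keys.Nodup) (ordered : List String) :
    d.items.foldl (fun acc kv =>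
        if PySem.Set.contains (ordered.foldl (fun (st2 : List pvSeqItem × PySem.Set String) chain_id =>
            if d.contains (norm chain_id) && !(PySem.Set.contains st2.2 (norm chain_id)) then
              (st2.1 ++ [(d.get? (norm chain_id)).getD []], PySem.Set.add st2.2 (norm chain_id))
            else st2) ([], PySem.Set.empty)).2 kv.1 then acc else acc ++ [kv.2])
      (ordered.foldl (fun (st2 : List pvSeqItem × PySem.Set String) chain_id =>
            if d.contains (norm chain_id) && !(PySem.Set.contains st2.2 (norm chain_id)) then
              (st2.1 ++ [(d.get? (norm chain_id)).getD []], PySem.Set.add st2.2 (norm chain_id))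
            else st2) ([], PySem.Set.empty)).1
    = (PySem.List.sorted (PySem.List.enumerate d.items 0)
        (fun t => toLex ((((PySem.List.enumerate ordered 0).foldl
            (fun dd p => dd.setdefault (norm p.2) p.1) PySem.Dict.empty).getD t.2.1
              (ordered.length : Int), t.1) : Int × Int))).map (fun t => t.2.2) := by
  have hloop2 := pv_loop2_char norm d ordered 0 PySem.Dict.empty [] PySem.Set.empty
    (by simp [PySem.Dict.keys, PySem.Dict.empty, PySem.Set.empty]) (by simp [PySem.Dict.keys, PySem.Dict.empty])
  set rF := (PySem.List.enumerate ordered 0).foldl (fun dd p => dd.setdefault (norm p.2) p.1)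
    PySem.Dict.empty with hrF
  obtain ⟨hbnd0, hrp, hrk⟩ := pv_rank_props norm ordered 0 PySem.Dict.empty
    (by simp [PySem.Dict.empty]) (by simp [PySem.Dict.empty]) (by simp [PySem.Dict.keys, PySem.Dict.empty])
  have hbnd : ∀ p ∈ rF.items, p.2 < (ordered.length : Int) := by
    intro p hp
    have := hbnd0 p hp
    omega
  rw [hloop2]
  -- third loop becomes a filter over the unranked items
  have hstep : ∀ (acc : List pvSeqItem) (kv : String × pvSeqItem), kv ∈ d.items →
      (if PySem.Set.contains (rF.keys.filter (fun k => d.contains k)) kv.1 then acc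
        else acc ++ [kv.2])
      = (if (!(rF.contains kv.1)) = true then acc ++ [kv.2] else acc) := by
    intro acc kv hkv
    have hdkv : d.contains kv.1 = true :=
      (PySem.Dict.contains_iff_mem_keys d kv.1).mpr (PySem.Dict.mem_keys_of_mem_items d hkv)
    by_cases hr : rF.contains kv.1 = true
    · have hmem : kv.1 ∈ rF.keys.filter (fun k => d.contains k) :=
        List.mem_filter.mpr ⟨(PySem.Dict.contains_iff_mem_keys rF kv.1).mp hr, hdkv⟩
      have hcontains : PySem.Set.contains (rF.keys.filter (fun k => d.contains k)) kv.1 = true :=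
        (PySem.Set.contains_iff _ _).mpr hmem
      rw [hcontains]
      simp [hr]
    · have hrf : rF.contains kv.1 = false := by simpa using hr
      have hnotmem : kv.1 ∉ rF.keys.filter (fun k => d.contains k) := by
        intro hm
        have := (List.mem_filter.mp hm).1
        exact hr ((PySem.Dict.contains_iff_mem_keys rF kv.1).mpr this)
      have : PySem.Set.contains (rF.keys.filter (fun k => d.contains k)) kv.1 = false := by
        by_contra hx
        have h' : PySem.Set.contains (rF.keys.filter (fun k => d.contains k)) kv.1 = true := by
          cases h'' : PySem.Set.contains (rF.keys.filter (fun k => d.contains k)) kv.1 with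
          | false => exact absurd h'' hx
          | true => rfl
        exact hnotmem ((PySem.Set.contains_iff _ _).mp h')
      rw [this]
      simp [hrf]
  dsimp only
  refine Eq.trans (PySem.List.foldl_congr_mem d.items
    (fun (acc : List pvSeqItem) (kv : String × pvSeqItem) =>
      if PySem.Set.contains (rF.keys.filter (fun k => d.contains k)) kv.1 = true then acc
      else acc ++ [kv.2])
    (fun (acc : List pvSeqItem) (kv : String × pvSeqItem) =>
      if (!(rF.contains kv.1)) = true then acc ++ [kv.2] else acc)
    _ hstep) ?_
  refine Eq.trans (PySem.List.foldl_append_if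
    (fun kv : String × pvSeqItem => !(rF.contains kv.1))
    (fun kv : String × pvSeqItem => kv.2) d.items _) ?_
  -- right-hand side
  rw [pv_sorted_char d hnd rF hrk hrp (ordered.length : Int) hbnd]
  rw [List.map_append]
  congr 1
  · -- ranked part
    rw [List.map_filterMap]
    have : ∀ p ∈ rF.items,
        ((PySem.List.enumerate d.items 0).find? (fun t => t.2.1 == p.1)).map (fun t => t.2.2)
          = d.get? p.1 := by
      intro p _
      have := pv_find_enum d.items 0 p.1
      simpa [PySem.Dict.get?] using this
    rw [List.filterMap_congr this]
    rw [show rF.keys = rF.items.map Prod.fst from rfl, List.filterMap_map]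
    rfl
  · -- leftover part
    have hmm : ((PySem.List.enumerate d.items 0).filter
        (fun t => !(rF.contains t.2.1))).map (fun t => t.2.2)
      = (((PySem.List.enumerate d.items 0).filter
        (fun t => !(rF.contains t.2.1))).map (fun t => t.2)).map (fun kv => kv.2) := by
      rw [List.map_map]
      rfl
    rw [hmm, pv_enum_filter_map d.items 0 (fun kv => !(rF.contains kv.1))]

-- ===== VERDICT (by name: the statement is the Claim_ definition above) =====
-- The two else-branches agree, for an arbitrary sequences list.
lemma pv_else (json_data : List (String × List (List (String × List (String × List String)))))
    (ordered_chain_ids : List String) (case_insensitive : Bool) (sequences : List pvSeqItem) :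
    (let st := sequences.foldl (fun (st : PySem.Dict String pvSeqItem × List pvSeqItem) seq_item =>
      match (pvEtypes.find? (fun et => (PySem.Dict.mk seq_item).contains et)).bind
              (fun et => (PySem.Dict.mk seq_item).get? et) with
      | none => (st.1, st.2 ++ [seq_item])
      | some entity_data =>
        match (PySem.Dict.mk entity_data).getD "auth_asym_id" [] with
        | [] => (st.1, st.2 ++ [seq_item])
        | first_chain_id :: _ =>
          (st.1.insert (pvNorm case_insensitive first_chain_id) seq_item, st.2))
      (PySem.Dict.empty, []);
    let st2 := ordered_chain_ids.foldl (fun (st2 : List pvSeqItem × PySem.Set String) chain_id =>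
      if st.1.contains (pvNorm case_insensitive chain_id)
          && !(PySem.Set.contains st2.2 (pvNorm case_insensitive chain_id)) then
        (st2.1 ++ [(st.1.get? (pvNorm case_insensitive chain_id)).getD []],
          PySem.Set.add st2.2 (pvNorm case_insensitive chain_id))
      else st2) ([], PySem.Set.empty);
    ((PySem.Dict.mk json_data).insert "sequences"
      ((st.1.items.foldl (fun acc kv =>
          if PySem.Set.contains st2.2 kv.1 then acc else acc ++ [kv.2]) st2.1) ++ st.2)).items)
    = (let st := sequences.foldl (fun (st : PySem.Dict String pvSeqItem × List pvSeqItem) seq_item =>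
        let ids :=
          match pvEtypes.find? (fun et => (PySem.Dict.mk seq_item).contains et) with
          | some et => ((PySem.Dict.mk seq_item).get? et).elim []
              (fun ent => (PySem.Dict.mk ent).getD "auth_asym_id" [])
          | none => []
        match ids with
        | first :: _ => (st.1.insert (pvNorm case_insensitive first) seq_item, st.2)
        | [] => (st.1, st.2 ++ [seq_item]))
        (PySem.Dict.empty, []);
      let rank := (PySem.List.enumerate ordered_chain_ids 0).foldl
        (fun d p => d.setdefault (pvNorm case_insensitive p.2) p.1) PySem.Dict.empty;
      ((PySem.Dict.mk json_data).insert "sequences"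
        ((PySem.List.sorted (PySem.List.enumerate st.1.items 0)
          (fun t => toLex ((rank.getD t.2.1 (ordered_chain_ids.length : Int), t.1) : Int × Int))).map
            (fun t => t.2.2) ++ st.2)).items) := by
  dsimp only
  rw [← pv_build_eq (pvNorm case_insensitive)]
  have hnodup := pv_build_nodup (pvNorm case_insensitive) sequences (PySem.Dict.empty, [])
    (by simp [PySem.Dict.keys, PySem.Dict.empty])
  congr 1
  congr 1
  congr 1
  exact pv_master (pvNorm case_insensitive) _ hnodup ordered_chain_ids

-- ===== VERDICT (by name: the statement is the Claim_ definition above) =====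
theorem reorder_sequences_by_chain_ids_spec : Claim_equal_reorder_sequences_by_chain_ids := by
  intro json_data ordered_chain_ids case_insensitive _
  unfold Spec_reorder_sequences_by_chain_ids
  unfold reorder_sequences_by_chain_ids reorder_sequences_by_chain_ids_alt
  by_cases hseq : (PySem.Dict.mk json_data).getD "sequences" [] = []
  · rw [if_pos hseq, if_pos hseq]
  · rw [if_neg hseq, if_neg hseq]
    exact pv_else json_data ordered_chain_ids case_insensitive _
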